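-- pv_equiv track=rewrite | github.com/Dantekd/trabajo_final | auxiliares_comodines.py | revelar_comodin
-- ===== SOURCE A (Python) =====
-- def revelar_comodin(palabra: str) -> str:
--     """Funcion comodin para revelar letras.
--
--     Args:
--         palabra (str): Segun una palabra aleatoria, revela.
--
--     Returns:
--         str: Devuelve el comodin
--     """
--
--     # trabajo con una lista vacia -> porque un str es inmutable.
--     lista_palabra_revelada = []
--     # la bandera para mostrar o no letra.
--     bandera_mostrar = False
--
--     # recorro
--     for letra in range(len(palabra)):
--
--         if bandera_mostrar:
--             lista_palabra_revelada.append(palabra[letra])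
--
--         if not bandera_mostrar:
--             lista_palabra_revelada.append("_")
--
--         bandera_mostrar = not bandera_mostrar
--
--     palabra_revelada = " ".join(lista_palabra_revelada)
--
--     return palabra_revelada
-- ===== SOURCE B (Python) =====
-- def revelar_comodin(palabra: str) -> str:
--     """Same result as A: underscore buffer, odd positions revealed by one slice assignment."""
--     lista = ["_"] * len(palabra)
--     lista[1::2] = palabra[1::2]
--     return " ".join(lista)
-- ===== Notes on version B (the rewrite author's own statement) =====
-- stated objective: idiomatic
-- what changed: Replaces the alternating-flag loop that appends one element per character with an all-underscore buffer patched in bulk by a single slice assignment lista[1::2] = palabra[1::2], then joined.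
import Mathlib
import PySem

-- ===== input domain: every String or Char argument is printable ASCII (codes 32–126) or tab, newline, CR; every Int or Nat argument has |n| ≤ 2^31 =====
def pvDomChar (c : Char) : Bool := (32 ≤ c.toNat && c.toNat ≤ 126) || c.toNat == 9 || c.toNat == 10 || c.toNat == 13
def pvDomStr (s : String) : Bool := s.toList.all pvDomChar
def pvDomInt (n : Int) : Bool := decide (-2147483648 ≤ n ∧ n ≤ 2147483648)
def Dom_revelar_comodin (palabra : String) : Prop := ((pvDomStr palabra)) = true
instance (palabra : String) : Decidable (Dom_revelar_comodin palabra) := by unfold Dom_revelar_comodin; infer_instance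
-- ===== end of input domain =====

-- B replaces A's alternating-flag append loop by an all-underscore buffer patched with one slice assignment (idiomatic; same O(n) cost).

-- ===== PORT A =====
-- the flag loop over range(len(palabra)); palabra[letra] is always in range, so pyGetD with a dummy default is exact
def revelar_comodin (palabra : String) : String :=
  let st := (PySem.List.pyRange 0 (PySem.Str.len palabra) 1).foldl
    (fun (st : List String × Bool) letra =>
      let lista := if st.2 then st.1 ++ [String.ofList [PySem.List.pyGetD palabra.toList letra ' ']] else st.1
      let lista := if !st.2 then lista ++ ["_"] else lista
      (lista, !st.2))
    ([], false)
  PySem.Str.join " " st.1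

-- ===== PORT B =====
-- lista[1::2] = cs: hand port of list slice assignment for step 2 from index 1; exact here because
-- cs = palabra[1::2] always has exactly the slice's length, so the assignment never resizes the list
def pvAssignOdd : List String → List Char → List String
  | a :: b :: rest, cs =>
    match cs with
    | c :: cs' => a :: String.ofList [c] :: pvAssignOdd rest cs'
    | [] => a :: b :: rest
  | l, _ => l

def revelar_comodin_alt (palabra : String) : String :=
  let lista := List.replicate (PySem.Str.len palabra).toNat "_"
  -- palabra[1::2]; Str.slice? is none only for step 0, so getD is exact
  let lista := pvAssignOdd lista ((PySem.Str.slice? palabra (some 1) none 2).getD "").toList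
  PySem.Str.join " " lista

-- ===== PRECONDITION & SPEC =====
def Spec_revelar_comodin (palabra : String) (out : String) : Prop := out = revelar_comodin_alt palabra
instance (palabra : String) (out : String) : Decidable (Spec_revelar_comodin palabra out) := by unfold Spec_revelar_comodin; infer_instance

-- ===== CLAIM (what is proved, stated in full; the proofs are below) =====
def Claim_equal_revelar_comodin : Prop := ∀ (palabra : String), Dom_revelar_comodin palabra → Spec_revelar_comodin palabra (revelar_comodin palabra)

-- ===== LEMMAS AND PROOFS =====

-- the list of pieces both programs build: underscore at even offsets, the letter at odd ones
def pvEmit : Bool → List Char → List String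
  | _, [] => []
  | false, _ :: cs => "_" :: pvEmit true cs
  | true, c :: cs => String.ofList [c] :: pvEmit false cs

-- every second element starting at index 1 (what palabra[1::2] selects)
def pvOddChars : List Char → List Char
  | _ :: c :: rest => c :: pvOddChars rest
  | _ => []

lemma pv_slice_closed (cs : List Char) :
    PySem.List.slice? cs (some 1) none 2 =
      some (List.filterMap (fun k => cs[1 + 2 * k]?) (List.range (cs.length / 2))) := by
  simp only [PySem.List.slice?, PySem.List.sliceIndices]
  norm_num
  rcases Nat.lt_or_ge cs.length 2 with h | h
  · rw [if_neg (by omega)]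
    have : cs.length / 2 = 0 := by omega
    simp [this]
  · rw [if_pos (by omega)]
    have h1 : min 1 (cs.length : Int) = 1 := by omega
    rw [h1]
    have h2 : (((cs.length : Int) - 1 + 2 - 1) / 2).toNat = cs.length / 2 := by omega
    rw [h2]
    apply List.filterMap_congr
    intro k hk
    congr 1

lemma pv_filterMap_odd (cs : List Char) :
    List.filterMap (fun k => cs[1 + 2 * k]?) (List.range (cs.length / 2)) = pvOddChars cs := by
  induction cs using pvOddChars.induct with
  | case1 a c rest ih =>
    simp only [pvOddChars, List.length_cons]
    have : (rest.length + 1 + 1) / 2 = rest.length / 2 + 1 := by omega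
    rw [this, List.range_succ_eq_map, List.filterMap_cons, List.filterMap_map]
    simp only [Function.comp_def]
    have : ∀ k : ℕ, (a :: c :: rest)[1 + 2 * (k + 1)]? = rest[1 + 2 * k]? := by
      intro k
      have : 1 + 2 * (k + 1) = (1 + 2 * k) + 2 := by omega
      simp [this]
    simp only [this, ih]
    rfl
  | case2 l h =>
    match l, h with
    | [], _ => rfl
    | [a], _ => simp [pvOddChars]
    | a :: b :: t, h => exact absurd rfl (h a b t)

-- A's loop body, named for the proofs
def pvStepA (st : List String × Bool) (c : Char) : List String × Bool :=
  let lista := if st.2 then st.1 ++ [String.ofList [c]] else st.1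
  let lista := if !st.2 then lista ++ ["_"] else lista
  (lista, !st.2)

-- A's loop builds acc ++ pvEmit flag cs
lemma pv_foldA (cs : List Char) (l : List String) (b : Bool) :
    (cs.foldl pvStepA (l, b)).1 = l ++ pvEmit b cs := by
  induction cs generalizing l b with
  | nil => simp [pvEmit]
  | cons c cs ih =>
    cases b
    · have h1 : pvStepA (l, false) c = (l ++ ["_"], true) := by simp [pvStepA]
      rw [List.foldl_cons, h1, ih]
      simp [pvEmit]
    · have h1 : pvStepA (l, true) c = (l ++ [String.ofList [c]], false) := by simp [pvStepA]
      rw [List.foldl_cons, h1, ih]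
      simp [pvEmit]

-- B's buffer-and-patch equals the same piece list
lemma pv_assign_emit (cs : List Char) :
    pvAssignOdd (List.replicate cs.length "_") (pvOddChars cs) = pvEmit false cs := by
  induction cs using pvOddChars.induct with
  | case1 a c rest ih =>
    simp only [pvOddChars, List.length_cons, List.replicate_succ, pvAssignOdd, pvEmit, ih]
  | case2 l h =>
    match l, h with
    | [], _ => rfl
    | [a], _ => rfl
    | a :: b :: t, h => exact absurd rfl (h a b t)

-- ===== VERDICT (by name: the statement is the Claim_ definition above) =====
theorem revelar_comodin_spec : Claim_equal_revelar_comodin := by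
  intro palabra _
  unfold Spec_revelar_comodin revelar_comodin revelar_comodin_alt
  have hA := PySem.List.foldl_pyRange_zero_pyGetD (xs := palabra.toList) (d := ' ')
      (f := pvStepA) (init := (([] : List String), false))
  simp only []
  have hlen : PySem.Str.len palabra = PySem.List.len palabra.toList := by
    simp [PySem.Str.len_eq, PySem.List.len]
  rw [hlen]
  rw [show (fun (st : List String × Bool) (letra : Int) =>
        let lista := if st.2 then st.1 ++ [String.ofList [PySem.List.pyGetD palabra.toList letra ' ']] else st.1
        let lista := if !st.2 then lista ++ ["_"] else lista
        (lista, !st.2))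
      = (fun (acc : List String × Bool) (j : Int) => pvStepA acc (PySem.List.pyGetD palabra.toList j ' ')) from rfl]
  rw [show PySem.List.pyRange 0 (PySem.List.len palabra.toList) 1
      = PySem.List.pyRange 0 (PySem.List.len palabra.toList) from rfl]
  rw [hA, pv_foldA, List.nil_append]
  have hslice : ((PySem.Str.slice? palabra (some 1) none 2).getD "").toList
      = pvOddChars palabra.toList := by
    have hmap := PySem.Str.slice?_map palabra (some 1) none 2
    rw [PySem.Chars.slice?_eq_listSlice?, pv_slice_closed] at hmap
    cases hc : PySem.Str.slice? palabra (some 1) none 2 with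
    | none => rw [hc] at hmap; simp at hmap
    | some s =>
      rw [hc] at hmap
      simp only [Option.map_some, Option.some.injEq] at hmap
      simp only [Option.getD_some]
      rw [hmap]
      simpa using pv_filterMap_odd palabra.toList
  have hn : (PySem.List.len palabra.toList).toNat = palabra.toList.length := by
    simp [PySem.List.len]
  rw [hslice, hn, pv_assign_emit]
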